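-- pv_equiv track=rewrite | github.com/mbuesch/toprammer | libtoprammer/util.py | generateHexdump
-- ===== SOURCE A (Python) =====
-- def byte2int(byte):
-- 	if isinstance(byte, int): # It's already int
-- 		assert 0 <= byte <= 0xFF
-- 		return byte
-- 	if isinstance(byte, str): # Compat for old code
-- 		assert len(byte) == 1
-- 		return ord(byte)
-- 	assert isinstance(byte, (bytes, bytearray))
-- 	assert len(byte) == 1
-- 	return byte[0]
--
-- def byte2ascii(c):
-- 	c = byte2int(c)
-- 	if c >= 32 and c <= 126:
-- 		return "%c" % c
-- 	return "."
--
-- def generateHexdump(mem):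
-- 	ret = ""
-- 	asc = ""
-- 	for i in range(0, len(mem)):
-- 		if i % 16 == 0 and i != 0:
-- 			ret += "  " + asc + "\n"
-- 			asc = ""
-- 		if i % 16 == 0:
-- 			ret += "0x%04X:  " % i
-- 		c = byte2int(mem[i])
-- 		ret += "%02X" % c
-- 		if (i % 2 != 0):
-- 			ret += " "
-- 		asc += byte2ascii(mem[i])
-- 	ret += "  " + asc + "\n\n"
-- 	return ret
-- ===== SOURCE B (Python) =====
-- def byte2int(byte):
-- 	if isinstance(byte, int):
-- 		assert 0 <= byte <= 0xFF
-- 		return byte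
-- 	if isinstance(byte, str):
-- 		assert len(byte) == 1
-- 		return ord(byte)
-- 	assert isinstance(byte, (bytes, bytearray))
-- 	assert len(byte) == 1
-- 	return byte[0]
--
-- def byte2ascii(c):
-- 	c = byte2int(c)
-- 	if c >= 32 and c <= 126:
-- 		return "%c" % c
-- 	return "."
--
-- def generateHexdump(mem):
-- 	ret = ""
-- 	asc = ""
-- 	for off in range(0, len(mem), 16):
-- 		if off != 0:
-- 			ret += "  " + asc + "\n"
-- 			asc = ""
-- 		ret += "0x%04X:  " % off
-- 		for j, c in enumerate(mem[off:off+16]):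
-- 			ret += "%02X" % byte2int(c)
-- 			if (off + j) % 2 != 0:
-- 				ret += " "
-- 			asc += byte2ascii(c)
-- 	ret += "  " + asc + "\n\n"
-- 	return ret
-- ===== Notes on version B (the rewrite author's own statement) =====
-- stated objective: alternative
-- what changed: A's single flat loop over byte indices with per-byte modulo-16 tests for row flush/header is replaced by an outer loop over 16-byte rows (flush + header once per row) with an inner loop over the row's bytes.
import Mathlib
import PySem

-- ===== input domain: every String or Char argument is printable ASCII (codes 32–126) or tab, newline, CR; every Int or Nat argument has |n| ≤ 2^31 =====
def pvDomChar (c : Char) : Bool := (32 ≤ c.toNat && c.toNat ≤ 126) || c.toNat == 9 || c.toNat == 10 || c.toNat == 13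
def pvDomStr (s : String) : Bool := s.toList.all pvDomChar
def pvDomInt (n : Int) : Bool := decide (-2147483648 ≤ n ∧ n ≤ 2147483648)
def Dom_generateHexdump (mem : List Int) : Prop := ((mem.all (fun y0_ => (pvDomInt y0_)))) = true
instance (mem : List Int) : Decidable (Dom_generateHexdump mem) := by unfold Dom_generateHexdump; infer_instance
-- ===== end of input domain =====

-- B replaces A's flat index loop with its per-byte modulo-16 flush tests by an outer loop
-- over 16-byte rows and an inner loop over the row's bytes (objective: alternative decomposition).

-- shared helpers: Python's "%0*X" formatting (both Pythons use the same % operator)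
def hexDigit (n : Nat) : Char := if n < 10 then Char.ofNat (48 + n) else Char.ofNat (55 + n)

def hexChars (n : Nat) : List Char :=
  if h : n < 16 then [hexDigit n]
  else hexChars (n / 16) ++ [hexDigit (n % 16)]
decreasing_by exact Nat.div_lt_self (by omega) (by omega)

-- "%0wX" % n  (pad with '0' to width w)
def hexPad (w n : Nat) : String := String.mk (List.replicate (w - (hexChars n).length) '0' ++ hexChars n)

-- byte2int: on an int input (the only shape of our domain) it asserts 0 ≤ b ≤ 255 (see Pre_) and returns it
def byte2int (b : Int) : Int := b

def byte2ascii (c : Int) : String :=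
  if 32 ≤ byte2int c ∧ byte2int c ≤ 126 then String.mk [Char.ofNat (byte2int c).toNat] else "."

-- ===== PORT A =====
-- A's single loop `for i in range(0, len(mem))`, state (ret, asc), transcribed statement by statement
def dumpLoopA : List Int → Nat → String → String → String
  | [], _, ret, asc => ret ++ "  " ++ asc ++ "\n\n"
  | c :: rest, i, ret, asc =>
    let ret1 := if i % 16 = 0 ∧ i ≠ 0 then ret ++ "  " ++ asc ++ "\n" else ret
    let asc1 := if i % 16 = 0 ∧ i ≠ 0 then "" else asc
    let ret2 := if i % 16 = 0 then ret1 ++ "0x" ++ hexPad 4 i ++ ":  " else ret1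
    let ret3 := ret2 ++ hexPad 2 (byte2int c).toNat
    let ret4 := if i % 2 ≠ 0 then ret3 ++ " " else ret3
    dumpLoopA rest (i + 1) ret4 (asc1 ++ byte2ascii c)

def generateHexdump (mem : List Int) : String := dumpLoopA mem 0 "" ""

-- ===== PORT B =====
-- B's inner loop: `for j, c in enumerate(mem[off:off+16])` over one row's bytes
def rowB : List Int → Nat → String → String → String × String
  | [], _, ret, asc => (ret, asc)
  | c :: rest, i, ret, asc =>
    let ret1 := ret ++ hexPad 2 (byte2int c).toNat
    let ret2 := if i % 2 ≠ 0 then ret1 ++ " " else ret1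
    rowB rest (i + 1) ret2 (asc ++ byte2ascii c)

-- B's outer loop: `for off in range(0, len(mem), 16)`, one iteration per 16-byte row
def loopB : List Int → Nat → String → String → String
  | [], _, ret, asc => ret ++ "  " ++ asc ++ "\n\n"
  | c :: rest, off, ret, asc =>
    let ret1 := if off ≠ 0 then ret ++ "  " ++ asc ++ "\n" else ret
    let asc1 := if off ≠ 0 then "" else asc
    let ret2 := ret1 ++ "0x" ++ hexPad 4 off ++ ":  "
    let p := rowB ((c :: rest).take 16) off ret2 asc1
    loopB ((c :: rest).drop 16) (off + 16) p.1 p.2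
termination_by mem _ _ _ => mem.length
decreasing_by simp only [List.length_drop, List.length_cons]; omega

def generateHexdump_alt (mem : List Int) : String := loopB mem 0 "" ""

-- ===== PRECONDITION & SPEC =====
-- Python A's byte2int asserts 0 <= byte <= 0xFF on every element; outside that A raises AssertionError.
def Pre_generateHexdump (mem : List Int) : Prop := ∀ c ∈ mem, 0 ≤ c ∧ c ≤ 255
instance (mem : List Int) : Decidable (Pre_generateHexdump mem) := by unfold Pre_generateHexdump; infer_instance
def pvWitness_generateHexdump : List Int := [0, 65, 255]

def Spec_generateHexdump (mem : List Int) (out : String) : Prop := out = generateHexdump_alt mem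
instance (mem : List Int) (out : String) : Decidable (Spec_generateHexdump mem out) := by unfold Spec_generateHexdump; infer_instance

-- ===== CLAIM (what is proved, stated in full; the proofs are below) =====
def Claim_equal_generateHexdump : Prop := ∀ (mem : List Int), Dom_generateHexdump mem → Pre_generateHexdump mem → Spec_generateHexdump mem (generateHexdump mem)

-- ===== LEMMAS AND PROOFS =====

-- A's loop over a block of indices none of which is ≡ 0 (mod 16) is exactly B's inner row loop.
lemma row_merge (chunk : List Int) : ∀ (rest : List Int) (i : Nat) (ret asc : String),
    (∀ j < chunk.length, (i + j) % 16 ≠ 0) →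
    dumpLoopA (chunk ++ rest) i ret asc =
      dumpLoopA rest (i + chunk.length) (rowB chunk i ret asc).1 (rowB chunk i ret asc).2 := by
  induction chunk with
  | nil => intro rest i ret asc _; simp [rowB]
  | cons c chunk' ih =>
    intro rest i ret asc h
    have h0 : i % 16 ≠ 0 := by have := h 0 (by simp); omega
    have h1 : ¬(i % 16 = 0 ∧ i ≠ 0) := by omega
    simp only [List.cons_append, List.length_cons, dumpLoopA, rowB, if_neg h1, if_neg h0]
    rw [show i + (chunk'.length + 1) = i + 1 + chunk'.length from by omega]
    exact ih rest (i + 1) _ _ (fun j hj => by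
      have := h (j + 1) (by simpa using Nat.succ_lt_succ hj)
      omega)

-- A's flat loop equals B's row-chunked loop at any row-aligned starting offset.
lemma main_eq : ∀ (n : Nat) (mem : List Int) (off : Nat) (ret asc : String),
    mem.length ≤ n → off % 16 = 0 →
    dumpLoopA mem off ret asc = loopB mem off ret asc := by
  intro n
  induction n with
  | zero =>
    intro mem off ret asc hn _
    have : mem = [] := List.eq_nil_of_length_eq_zero (by omega)
    subst this
    rw [loopB]; simp [dumpLoopA]
  | succ n ih =>
    intro mem off ret asc hn hoff
    cases mem with
    | nil => rw [loopB]; simp [dumpLoopA]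
    | cons c rest =>
      have h1 : ¬ off % 2 ≠ 0 := by omega
      rw [loopB,
          show List.take 16 (c :: rest) = c :: List.take 15 rest from rfl,
          show List.drop 16 (c :: rest) = List.drop 15 rest from rfl]
      simp only [dumpLoopA, rowB, hoff, if_neg h1, eq_self_iff_true, true_and, if_true]
      conv_lhs => rw [← List.take_append_drop 15 rest]
      rw [row_merge (rest.take 15) (rest.drop 15) (off + 1) _ _
            (fun j hj => by
              have hle : (rest.take 15).length ≤ 15 := by
                rw [List.length_take]; omega
              omega)]
      by_cases hd : rest.drop 15 = []
      · rw [hd, loopB]; simp [dumpLoopA]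
      · have hlen : 15 < rest.length := by
          by_contra hc
          exact hd (List.drop_eq_nil_of_le (by omega))
        have htk : (rest.take 15).length = 15 := by rw [List.length_take]; omega
        rw [htk, show off + 1 + 15 = off + 16 from by omega]
        exact ih (rest.drop 15) (off + 16) _ _
          (by rw [List.length_drop]; simp at hn; omega) (by omega)

-- ===== VERDICT (by name: the statement is the Claim_ definition above) =====
theorem generateHexdump_spec : Claim_equal_generateHexdump := by
  intro mem _ _
  show generateHexdump mem = generateHexdump_alt mem
  exact main_eq mem.length mem 0 "" "" le_rfl rfl
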